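-- pv_equiv track=rewrite | github.com/Josverl/autodoc201 | tests/test_library_pages.py | ignore_assignments
-- ===== SOURCE A (Python) =====
-- def ignore_assignments(diff_lines):
--     """
--     Ignore lines that are assignments of the form `+ x = ...`
--     but only if the line is also present in the opposite form without the value.
--
--     """
--     r2 = diff_lines.copy()
--     for l in diff_lines:
--         if l.startswith("+ ") and "=" in l:
--             partial = l.split("=")[0].strip()
--             opposite = f"- {partial[2:]}"
--             if opposite in r2:
--                 r2.remove(l)
--                 r2.remove(opposite)
--     return r2
-- ===== SOURCE B (Python) =====
-- def ignore_assignments(diff_lines):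
--     """
--     Ignore lines that are assignments of the form `+ x = ...`
--     but only if the line is also present in the opposite form without the value.
--     """
--     # count every "- " line once, up front
--     total = {}
--     for l in diff_lines:
--         if l.startswith("- "):
--             total[l] = total.get(l, 0) + 1
--     # decide, per line value, how many occurrences get cancelled
--     drops = {}
--     for l in diff_lines:
--         if l.startswith("+ ") and "=" in l:
--             v = "- " + l.split("=")[0].strip()[2:]
--             if drops.get(v, 0) < total.get(v, 0):
--                 drops[v] = drops.get(v, 0) + 1
--                 drops[l] = drops.get(l, 0) + 1
--     # one filtering pass: drop the first drops[l] occurrences of each value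
--     out = []
--     for l in diff_lines:
--         d = drops.get(l, 0)
--         if d > 0:
--             drops[l] = d - 1
--         else:
--             out.append(l)
--     return out
-- ===== Notes on version B (the rewrite author's own statement) =====
-- stated objective: alternative
-- what changed: Replaces the scan-and-remove loop (list membership and list.remove inside the loop) by three counting passes over the list with dicts: count '- ' lines, decide per line value how many occurrences get cancelled, then filter dropping the first that-many occurrences of each value.
import Mathlib
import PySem

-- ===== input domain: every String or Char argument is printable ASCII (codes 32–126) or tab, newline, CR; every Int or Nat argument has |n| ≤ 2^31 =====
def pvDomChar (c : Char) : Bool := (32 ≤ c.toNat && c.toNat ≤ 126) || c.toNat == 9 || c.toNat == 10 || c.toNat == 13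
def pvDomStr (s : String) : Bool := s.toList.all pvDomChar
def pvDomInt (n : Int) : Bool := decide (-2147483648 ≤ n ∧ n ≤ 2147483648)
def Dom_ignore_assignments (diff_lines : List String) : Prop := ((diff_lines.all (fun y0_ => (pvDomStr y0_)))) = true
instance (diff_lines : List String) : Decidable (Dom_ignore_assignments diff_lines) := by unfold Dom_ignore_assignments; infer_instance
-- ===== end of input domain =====

-- B replaces A's scan-and-remove loop (list membership and removal inside the loop) by three counting passes with dicts (alternative algorithm, same result).


-- ===== PORT A =====
-- shared helper: the identical expression `"- " + l.split("=")[0].strip()[2:]` (locals `partial`, `opposite`)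
-- of both Pythons (split? "=" is never none since the separator is nonempty, and split never returns []:
-- the getD/headD defaults are unreachable)
def pvOpp (l : String) : String :=
  "- " ++ PySem.Str.slice (PySem.Str.strip (((PySem.Str.split? l "=").getD [l]).headD "")) (some 2) none

def ignore_assignments (diff_lines : List String) : List String :=
  -- r2 = diff_lines.copy(); for l in diff_lines: … ; return r2
  diff_lines.foldl (fun r2 l =>
    if (PySem.Str.startswith l "+ " && PySem.Str.isIn "=" l) = true then
      if pvOpp l ∈ r2 then
        -- r2.remove(l); r2.remove(opposite)  (remove? is some in every reachable state: a '+ ' line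
        -- is never removed as an opposite, so l is still present; the getD defaults are unreachable)
        (PySem.List.remove? ((PySem.List.remove? r2 l).getD r2) (pvOpp l)).getD
          ((PySem.List.remove? r2 l).getD r2)
      else r2
    else r2) diff_lines

-- ===== PORT B =====
def ignore_assignments_alt (diff_lines : List String) : List String :=
  -- total = {}; for l in diff_lines: if l.startswith("- "): total[l] = total.get(l, 0) + 1
  -- drops = {}; for l in diff_lines: if +-assignment and drops.get(v,0) < total.get(v,0): bump v, bump l
  -- out = []; for l in diff_lines: d = drops.get(l,0); if d > 0: drops[l] = d - 1 else: out.append(l)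
  (diff_lines.foldl (fun (st : PySem.Dict String Int × List String) l =>
      if 0 < st.1.getD l 0 then (st.1.insert l (st.1.getD l 0 - 1), st.2)
      else (st.1, st.2 ++ [l]))
    (diff_lines.foldl (fun d l =>
      if (PySem.Str.startswith l "+ " && PySem.Str.isIn "=" l) = true then
        if d.getD (pvOpp l) 0 <
            (diff_lines.foldl (fun d l =>
              if PySem.Str.startswith l "- " then d.insert l (d.getD l 0 + 1) else d)
              PySem.Dict.empty).getD (pvOpp l) 0 then
          (d.insert (pvOpp l) (d.getD (pvOpp l) 0 + 1)).insert l
            ((d.insert (pvOpp l) (d.getD (pvOpp l) 0 + 1)).getD l 0 + 1)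
        else d
      else d) PySem.Dict.empty, [])).2

-- ===== PRECONDITION & SPEC =====
def Spec_ignore_assignments (diff_lines : List String) (out : List String) : Prop := out = ignore_assignments_alt diff_lines
instance (diff_lines : List String) (out : List String) : Decidable (Spec_ignore_assignments diff_lines out) := by unfold Spec_ignore_assignments; infer_instance

-- ===== CLAIM (what is proved, stated in full; the proofs are below) =====
def Claim_equal_ignore_assignments : Prop := ∀ (diff_lines : List String), Dom_ignore_assignments diff_lines → Spec_ignore_assignments diff_lines (ignore_assignments diff_lines)

-- ===== LEMMAS AND PROOFS =====

-- counter bump / decrement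
def pvBump (c : String → Int) (s : String) : String → Int := fun t => if t = s then c t + 1 else c t
def pvDec (c : String → Int) (s : String) : String → Int := fun t => if t = s then c t - 1 else c t

-- drop the first (c v) occurrences of each value v
def pvRender : List String → (String → Int) → List String
  | [], _ => []
  | x :: xs, c => if 0 < c x then pvRender xs (pvDec c x) else x :: pvRender xs c

def pvTot (lines : List String) (s : String) : Int := (lines.count s : Int)

def pvStep (lines : List String) (c : String → Int) (l : String) : String → Int :=
  if (PySem.Str.startswith l "+ " && PySem.Str.isIn "=" l) = true then
    if c (pvOpp l) < pvTot lines (pvOpp l) then pvBump (pvBump c (pvOpp l)) l else c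
  else c

theorem pvRender_zero (xs : List String) : pvRender xs (fun _ => 0) = xs := by
  induction xs with
  | nil => rfl
  | cons x xs ih => simp [pvRender, ih]

theorem pvBump_nonneg {c : String → Int} (h : ∀ s, 0 ≤ c s) (a : String) :
    ∀ s, 0 ≤ pvBump c a s := by
  intro s
  show 0 ≤ if s = a then c s + 1 else c s
  split_ifs <;> have := h s <;> omega

theorem pvDec_nonneg {c : String → Int} (h : ∀ s, 0 ≤ c s) {y : String} (hy : 0 < c y) :
    ∀ s, 0 ≤ pvDec c y s := by
  intro s
  show 0 ≤ if s = y then c s - 1 else c s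
  split_ifs with hs
  · subst hs; omega
  · exact h s

theorem pvDec_bump_comm (c : String → Int) (a b : String) :
    pvDec (pvBump c a) b = pvBump (pvDec c b) a := by
  funext t
  simp only [pvBump, pvDec]
  split_ifs <;> omega

theorem pvDec_bump_self (c : String → Int) (y : String) : pvDec (pvBump c y) y = c := by
  funext t
  simp only [pvBump, pvDec]
  split_ifs <;> omega

theorem pvBump_comm (c : String → Int) (a b : String) :
    pvBump (pvBump c a) b = pvBump (pvBump c b) a := by
  funext t
  simp only [pvBump]
  split_ifs <;> omega

theorem mem_pvRender {xs : List String} {c : String → Int} (h : ∀ s, 0 ≤ c s) (x : String) :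
    x ∈ pvRender xs c ↔ c x < pvTot xs x := by
  unfold pvTot
  induction xs generalizing c with
  | nil =>
    simp only [pvRender, List.not_mem_nil, List.count_nil, Nat.cast_zero, false_iff, not_lt]
    exact h x
  | cons y xs ih =>
    simp only [pvRender]
    by_cases hy : 0 < c y
    · rw [if_pos hy, ih (pvDec_nonneg h hy)]
      by_cases hxy : x = y
      · subst hxy
        have hd : pvDec c x x = c x - 1 := by simp [pvDec]
        rw [hd, List.count_cons_self]
        push_cast; omega
      · have hd : pvDec c y x = c x := by simp [pvDec, hxy]
        have hyx : ¬ y = x := fun hh => hxy hh.symm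
        have hc : List.count x (y :: xs) = List.count x xs := by simp [hyx]
        rw [hd, hc]
    · rw [if_neg hy, List.mem_cons, ih h]
      by_cases hxy : x = y
      · subst hxy
        have h0 : c x = 0 := le_antisymm (not_lt.mp hy) (h x)
        rw [List.count_cons_self]
        constructor
        · intro _; rw [h0]; exact_mod_cast Nat.succ_pos _
        · intro _; left; rfl
      · have hyx : ¬ y = x := fun hh => hxy hh.symm
        have hc : List.count x (y :: xs) = List.count x xs := by simp [hyx]
        rw [hc]
        simp [hxy]

theorem erase_pvRender {xs : List String} {c : String → Int} (h : ∀ s, 0 ≤ c s) (x : String) :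
    (pvRender xs c).erase x = pvRender xs (pvBump c x) := by
  induction xs generalizing c with
  | nil => rfl
  | cons y xs ih =>
    simp only [pvRender]
    by_cases hxy : y = x
    · subst hxy
      by_cases hy : 0 < c y
      · have hb : 0 < pvBump c y y := by simp [pvBump]; omega
        rw [if_pos hy, if_pos hb, ih (pvDec_nonneg h hy), pvDec_bump_comm]
      · have h0 : c y = 0 := le_antisymm (not_lt.mp hy) (h y)
        have hb : 0 < pvBump c y y := by simp [pvBump]; omega
        rw [if_neg hy, if_pos hb, pvDec_bump_self, List.erase_cons_head]
    · have hbne : pvBump c x y = c y := by simp [pvBump, hxy]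
      by_cases hy : 0 < c y
      · rw [if_pos hy, if_pos (by rw [hbne]; exact hy), ih (pvDec_nonneg h hy), pvDec_bump_comm]
      · rw [if_neg hy, if_neg (by rw [hbne]; exact hy),
          List.erase_cons_tail (by simp [hxy]), ih h]

theorem pvRemoveD (xs : List String) (v : String) :
    (PySem.List.remove? xs v).getD xs = xs.erase v := by
  by_cases hv : v ∈ xs
  · rw [PySem.List.remove?_eq_some_erase xs v hv]
    rfl
  · rw [(PySem.List.remove?_eq_none_iff xs v).mpr hv, List.erase_of_not_mem hv]
    rfl

-- A's loop, seen through pvRender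
theorem A_loop_render (lines : List String) (p : List String) (c : String → Int)
    (h : ∀ s, 0 ≤ c s) :
    p.foldl (fun r2 l =>
      if (PySem.Str.startswith l "+ " && PySem.Str.isIn "=" l) = true then
        if pvOpp l ∈ r2 then
          (PySem.List.remove? ((PySem.List.remove? r2 l).getD r2) (pvOpp l)).getD
            ((PySem.List.remove? r2 l).getD r2)
        else r2
      else r2) (pvRender lines c)
    = pvRender lines (p.foldl (pvStep lines) c) := by
  induction p generalizing c with
  | nil => rfl
  | cons l p ih =>
    simp only [List.foldl_cons]
    by_cases hg : (PySem.Str.startswith l "+ " && PySem.Str.isIn "=" l) = true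
    · rw [if_pos hg]
      by_cases hmem : pvOpp l ∈ pvRender lines c
      · rw [if_pos hmem]
        have hcond : c (pvOpp l) < pvTot lines (pvOpp l) := (mem_pvRender h (pvOpp l)).mp hmem
        have hstep : pvStep lines c l = pvBump (pvBump c (pvOpp l)) l := by
          unfold pvStep
          rw [if_pos hg, if_pos hcond]
        rw [pvRemoveD, pvRemoveD, erase_pvRender h, erase_pvRender (pvBump_nonneg h l),
          pvBump_comm, hstep]
        exact ih _ (pvBump_nonneg (pvBump_nonneg h (pvOpp l)) l)
      · rw [if_neg hmem]
        have hcond : ¬ c (pvOpp l) < pvTot lines (pvOpp l) := by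
          rw [← mem_pvRender h (pvOpp l)]; exact hmem
        have hstep : pvStep lines c l = c := by
          unfold pvStep
          rw [if_pos hg, if_neg hcond]
        rw [hstep]
        exact ih c h
    · rw [if_neg hg]
      have hstep : pvStep lines c l = c := by
        unfold pvStep
        rw [if_neg hg]
      rw [hstep]
      exact ih c h

-- pvOpp always produces a "- "-prefixed string
theorem pvOpp_minus (l : String) : PySem.Str.startswith (pvOpp l) "- " = true := by
  simp only [pvOpp, PySem.Str.startswith_eq]
  rw [PySem.Chars.startswith_iff, String.toList_append]
  exact List.prefix_append _ _

-- B's first pass counts, at any "- "-prefixed key, the occurrences in the whole list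
theorem B_total_getD (lines : List String) (v : String)
    (hv : PySem.Str.startswith v "- " = true) :
    (lines.foldl (fun d l =>
        if PySem.Str.startswith l "- " then d.insert l (d.getD l 0 + 1) else d)
      (PySem.Dict.empty : PySem.Dict String Int)).getD v 0 = pvTot lines v := by
  rw [← List.foldl_filter, PySem.Dict.getD_foldl_insert_add_one, PySem.Dict.getD_empty,
    List.count_filter (by simpa using hv)]
  simp [pvTot]

-- getD facts for the two in-loop dict updates
theorem pvDict_double_bump (d : PySem.Dict String Int) (c : String → Int)
    (hd : ∀ s, d.getD s 0 = c s) (v l : String) :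
    ∀ s, ((d.insert v (d.getD v 0 + 1)).insert l
        ((d.insert v (d.getD v 0 + 1)).getD l 0 + 1)).getD s 0
      = pvBump (pvBump c v) l s := by
  have h1 : ∀ k, (d.insert v (d.getD v 0 + 1)).getD k 0 = pvBump c v k := by
    intro k
    rw [PySem.Dict.getD_insert]
    show _ = if k = v then c k + 1 else c k
    split_ifs with hkv
    · subst hkv; rw [hd]
    · rw [hd]
  intro s
  rw [PySem.Dict.getD_insert]
  show _ = if s = l then pvBump c v s + 1 else pvBump c v s
  split_ifs with hsl
  · subst hsl; rw [h1]
  · exact h1 s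

theorem pvDict_dec (d : PySem.Dict String Int) (c : String → Int)
    (hd : ∀ s, d.getD s 0 = c s) (x : String) :
    ∀ s, (d.insert x (d.getD x 0 - 1)).getD s 0 = pvDec c x s := by
  intro s
  rw [PySem.Dict.getD_insert]
  show _ = if s = x then c s - 1 else c s
  split_ifs with hsx
  · subst hsx; rw [hd]
  · rw [hd]

-- B's second pass computes the spec counter
theorem B_drops_getD (lines : List String) (p : List String)
    (total : PySem.Dict String Int)
    (htot : ∀ v, PySem.Str.startswith v "- " = true → total.getD v 0 = pvTot lines v)
    (d : PySem.Dict String Int) (c : String → Int) (hd : ∀ s, d.getD s 0 = c s) :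
    ∀ s, (p.foldl (fun d l =>
        if (PySem.Str.startswith l "+ " && PySem.Str.isIn "=" l) = true then
          if d.getD (pvOpp l) 0 < total.getD (pvOpp l) 0 then
            (d.insert (pvOpp l) (d.getD (pvOpp l) 0 + 1)).insert l
              ((d.insert (pvOpp l) (d.getD (pvOpp l) 0 + 1)).getD l 0 + 1)
          else d
        else d) d).getD s 0 = (p.foldl (pvStep lines) c) s := by
  induction p generalizing d c with
  | nil => exact hd
  | cons l p ih =>
    intro s
    simp only [List.foldl_cons]
    by_cases hg : (PySem.Str.startswith l "+ " && PySem.Str.isIn "=" l) = true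
    · rw [if_pos hg]
      by_cases hcond : c (pvOpp l) < pvTot lines (pvOpp l)
      · have hcondD : d.getD (pvOpp l) 0 < total.getD (pvOpp l) 0 := by
          rw [hd, htot _ (pvOpp_minus l)]; exact hcond
        rw [if_pos hcondD]
        have hstep : pvStep lines c l = pvBump (pvBump c (pvOpp l)) l := by
          unfold pvStep
          rw [if_pos hg, if_pos hcond]
        rw [hstep]
        exact ih _ _ (pvDict_double_bump d c hd (pvOpp l) l) s
      · have hcondD : ¬ d.getD (pvOpp l) 0 < total.getD (pvOpp l) 0 := by
          rw [hd, htot _ (pvOpp_minus l)]; exact hcond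
        rw [if_neg hcondD]
        have hstep : pvStep lines c l = c := by
          unfold pvStep
          rw [if_pos hg, if_neg hcond]
        rw [hstep]
        exact ih d c hd s
    · rw [if_neg hg]
      have hstep : pvStep lines c l = c := by
        unfold pvStep
        rw [if_neg hg]
      rw [hstep]
      exact ih d c hd s

-- B's third pass is pvRender
theorem B_pass3 (xs : List String) (d : PySem.Dict String Int) (c : String → Int)
    (hd : ∀ s, d.getD s 0 = c s) (out : List String) :
    (xs.foldl (fun (st : PySem.Dict String Int × List String) l =>
        if 0 < st.1.getD l 0 then (st.1.insert l (st.1.getD l 0 - 1), st.2)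
        else (st.1, st.2 ++ [l]))
      (d, out)).2 = out ++ pvRender xs c := by
  induction xs generalizing d c out with
  | nil => simp [pvRender]
  | cons x xs ih =>
    simp only [List.foldl_cons, pvRender]
    by_cases hx : 0 < c x
    · have hxD : 0 < d.getD x 0 := by rw [hd]; exact hx
      rw [if_pos hxD, if_pos hx]
      exact ih _ _ (pvDict_dec d c hd x) out
    · have hxD : ¬ 0 < d.getD x 0 := by rw [hd]; exact hx
      rw [if_neg hxD, if_neg hx, ih d c hd (out ++ [x])]
      simp

theorem B_eq_render (lines : List String) :
    ignore_assignments_alt lines = pvRender lines (lines.foldl (pvStep lines) (fun _ => 0)) := by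
  have h := B_pass3 lines _ (lines.foldl (pvStep lines) (fun _ => 0))
    (B_drops_getD lines lines _
      (fun v hv => B_total_getD lines v hv)
      PySem.Dict.empty (fun _ => 0) (fun s => PySem.Dict.getD_empty s 0)) []
  rw [List.nil_append] at h
  exact h

theorem A_eq_render (lines : List String) :
    ignore_assignments lines = pvRender lines (lines.foldl (pvStep lines) (fun _ => 0)) := by
  have hA := A_loop_render lines lines (fun _ => 0) (fun _ => le_refl 0)
  rw [pvRender_zero] at hA
  exact hA

-- ===== VERDICT (by name: the statement is the Claim_ definition above) =====
theorem ignore_assignments_spec : Claim_equal_ignore_assignments := by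
  intro diff_lines _
  unfold Spec_ignore_assignments
  rw [A_eq_render, B_eq_render]
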